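-- pv_equiv track=rewrite | github.com/ghepavdi/hashcode-2018-pizza | pizza.py | get_kernel_sizes
-- ===== SOURCE A (Python) =====
-- from itertools import product
--
-- def get_kernel_sizes(min_ingredients_per_slice, max_slice_dim):
--     max_kernel_size = min_ingredients_per_slice + min_ingredients_per_slice
--     x = 1
--     y = max_kernel_size
--     kernel_sizes = []
--
--     for x, y in product(range(1, max_slice_dim + 1), range(1, max_slice_dim  + 1)):
--         if x * y >= max_kernel_size and x * y <= max_slice_dim:
--             kernel_sizes.append((x, y))
--
--     return kernel_sizes
-- ===== SOURCE B (Python) =====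
-- def get_kernel_sizes(min_ingredients_per_slice, max_slice_dim):
--     # Walk x downward; for each x the valid y form a contiguous interval given by
--     # integer-division bounds, walked downward too; one final reverse restores
--     # ascending (x, y) order.
--     max_kernel_size = 2 * min_ingredients_per_slice
--     out = []
--     x = max_slice_dim
--     while x >= 1:
--         lo = max(1, -((-max_kernel_size) // x))   # ceil(max_kernel_size / x), at least 1
--         y = max_slice_dim // x                    # largest y with x*y <= max_slice_dim
--         while y >= lo:
--             out.append((x, y))
--             y -= 1
--         x -= 1
--     out.reverse()
--     return out
-- ===== Notes on version B (the rewrite author's own statement) =====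
-- stated objective: faster
-- what changed: Replaced the double ascending scan over all (x,y) pairs with descending while-loops that, for each x, emit only the valid y-interval computed from integer-division bounds, building the list back-to-front and reversing once.
import Mathlib
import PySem

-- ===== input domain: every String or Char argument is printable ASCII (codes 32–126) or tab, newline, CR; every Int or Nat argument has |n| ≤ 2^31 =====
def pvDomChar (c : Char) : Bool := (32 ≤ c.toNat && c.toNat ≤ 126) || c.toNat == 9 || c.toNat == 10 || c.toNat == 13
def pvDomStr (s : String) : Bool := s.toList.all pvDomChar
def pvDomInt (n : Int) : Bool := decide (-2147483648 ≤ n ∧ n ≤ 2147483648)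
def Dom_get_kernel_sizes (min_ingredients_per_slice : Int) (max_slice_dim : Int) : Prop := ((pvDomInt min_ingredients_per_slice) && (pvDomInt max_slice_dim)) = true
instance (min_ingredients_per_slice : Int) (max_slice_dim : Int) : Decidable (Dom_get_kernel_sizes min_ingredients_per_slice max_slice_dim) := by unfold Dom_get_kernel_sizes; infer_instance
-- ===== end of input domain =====

-- B replaces A's O(D^2) scan over all (x,y) pairs by descending while-loops that emit,
-- for each x, only the valid y-interval from integer-division bounds, then reverse once:
-- O(D + output) vs O(D^2).

-- ===== PORT A =====
-- A: double loop (itertools.product) over x,y in [1, max_slice_dim], filter by the two products.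
def get_kernel_sizes (min_ingredients_per_slice : Int) (max_slice_dim : Int) : List (Int × Int) :=
  let max_kernel_size := min_ingredients_per_slice + min_ingredients_per_slice
  (PySem.List.pyRange 1 (max_slice_dim + 1) 1).foldl (fun acc x =>
    (PySem.List.pyRange 1 (max_slice_dim + 1) 1).foldl (fun acc y =>
      if x * y ≥ max_kernel_size ∧ x * y ≤ max_slice_dim then acc ++ [(x, y)] else acc) acc) []

-- ===== PORT B =====
-- B: inner while loop 'while y >= lo: out.append((x, y)); y -= 1'
def gksRowB (x lo : Int) (y : Int) (acc : List (Int × Int)) : List (Int × Int) :=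
  if _h : lo ≤ y then gksRowB x lo (y - 1) (acc ++ [(x, y)]) else acc
termination_by (y + 1 - lo).toNat
decreasing_by omega

-- B: outer while loop 'while x >= 1: …; x -= 1'
def gksColsB (max_kernel_size max_slice_dim : Int) (x : Int) (acc : List (Int × Int)) : List (Int × Int) :=
  if _h : 1 ≤ x then
    gksColsB max_kernel_size max_slice_dim (x - 1)
      (gksRowB x (max 1 (-(PySem.Int.floordiv (-max_kernel_size) x)))
        (PySem.Int.floordiv max_slice_dim x) acc)
  else acc
termination_by x.toNat
decreasing_by omega

def get_kernel_sizes_alt (min_ingredients_per_slice : Int) (max_slice_dim : Int) : List (Int × Int) :=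
  let max_kernel_size := 2 * min_ingredients_per_slice
  (gksColsB max_kernel_size max_slice_dim max_slice_dim []).reverse

-- ===== PRECONDITION & SPEC =====
def Spec_get_kernel_sizes (min_ingredients_per_slice : Int) (max_slice_dim : Int) (out : List (Int × Int)) : Prop := out = get_kernel_sizes_alt min_ingredients_per_slice max_slice_dim
instance (min_ingredients_per_slice : Int) (max_slice_dim : Int) (out : List (Int × Int)) : Decidable (Spec_get_kernel_sizes min_ingredients_per_slice max_slice_dim out) := by unfold Spec_get_kernel_sizes; infer_instance

-- ===== CLAIM =====
def Claim_equal_get_kernel_sizes : Prop := ∀ (min_ingredients_per_slice : Int) (max_slice_dim : Int), Dom_get_kernel_sizes min_ingredients_per_slice max_slice_dim → Spec_get_kernel_sizes min_ingredients_per_slice max_slice_dim (get_kernel_sizes min_ingredients_per_slice max_slice_dim)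

-- ===== LEMMAS AND PROOFS =====

-- the ascending per-x row of B's interval
def pvRowL (lo hi x : Int) : List (Int × Int) :=
  (PySem.List.pyRange lo (hi + 1) 1).map (fun y => (x, y))

-- append-if fold is filter-then-map
theorem pv_foldl_append_ite {α β : Type} (l : List α) (P : α → Prop) [DecidablePred P]
    (f : α → β) (acc : List β) :
    l.foldl (fun acc x => if P x then acc ++ [f x] else acc) acc
      = acc ++ (l.filter (fun x => decide (P x))).map f := by
  induction l generalizing acc with
  | nil => simp
  | cons a l ih =>
      simp only [List.foldl_cons, List.filter_cons]
      by_cases h : P a <;> simp [h, ih, List.append_assoc]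

-- append fold is flatMap
theorem pv_foldl_append_flatMap {α β : Type} (l : List α) (g : α → List β) (acc : List β) :
    l.foldl (fun acc x => acc ++ g x) acc = acc ++ l.flatMap g := by
  induction l generalizing acc with
  | nil => simp
  | cons a l ih => simp [ih, List.append_assoc]

-- the per-x interval: filtering the full y-range equals the range [lo, hi]
theorem pv_filter_range (M d x : Int) (hx1 : 1 ≤ x) (hxd : x ≤ d) :
    (PySem.List.pyRange 1 (d + 1) 1).filter
        (fun y => decide (x * y ≥ M ∧ x * y ≤ d))
      = PySem.List.pyRange (max 1 (-(PySem.Int.floordiv (-M) x))) (PySem.Int.floordiv d x + 1) 1 := by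
  have hxpos : 0 < x := by omega
  set c := -(PySem.Int.floordiv (-M) x) with hc
  set hi := PySem.Int.floordiv d x with hhi
  have hceil : ∀ y : Int, c ≤ y ↔ M ≤ x * y := by
    intro y
    constructor
    · intro h
      have h2 : (-y) * x ≤ -M := (PySem.Int.le_floordiv_iff_mul_le hxpos).mp (by omega)
      nlinarith
    · intro h
      have h2 : (-y) * x ≤ -M := by nlinarith
      have := (PySem.Int.le_floordiv_iff_mul_le hxpos).mpr h2
      omega
  have hfloor : ∀ y : Int, y ≤ hi ↔ x * y ≤ d := by
    intro y
    rw [hhi, PySem.Int.le_floordiv_iff_mul_le hxpos]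
    constructor <;> intro h <;> nlinarith
  have hhid : hi ≤ d := by
    have := (hfloor hi).mp le_rfl
    nlinarith
  by_cases hle : max 1 c ≤ hi
  · have h1 : (1 : Int) ≤ max 1 c := le_max_left _ _
    rw [PySem.List.pyRange_one_append 1 (max 1 c) (d + 1) h1 (by omega),
        PySem.List.pyRange_one_append (max 1 c) (hi + 1) (d + 1) (by omega) (by omega),
        List.filter_append, List.filter_append]
    rw [List.filter_eq_nil_iff.mpr, List.filter_eq_self.mpr, List.filter_eq_nil_iff.mpr]
    · simp
    · intro y hy
      rw [PySem.List.mem_pyRange_one] at hy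
      simp only [decide_eq_true_eq, not_and, not_le, ge_iff_le]
      intro _
      have := (hfloor y).not.mp (by omega)
      omega
    · intro y hy
      rw [PySem.List.mem_pyRange_one] at hy
      simp only [decide_eq_true_eq, ge_iff_le]
      exact ⟨(hceil y).mp (by omega), (hfloor y).mp (by omega)⟩
    · intro y hy
      rw [PySem.List.mem_pyRange_one] at hy
      simp only [decide_eq_true_eq, not_and, ge_iff_le]
      intro hM
      have := (hceil y).mpr hM
      have := (hfloor y).not.mpr
      omega
  · rw [show PySem.List.pyRange (max 1 c) (hi + 1) 1 = [] from
          PySem.List.pyRange_one_eq_nil (by omega)]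
    rw [List.filter_eq_nil_iff]
    intro y hy
    rw [PySem.List.mem_pyRange_one] at hy
    simp only [decide_eq_true_eq, not_and, ge_iff_le]
    intro hM hd
    have := (hceil y).mpr hM
    have := (hfloor y).mpr hd
    omega

-- descending inner loop = reversed ascending row, appended
theorem pv_gksRowB_eq (x lo : Int) : ∀ (y : Int) (acc : List (Int × Int)),
    gksRowB x lo y acc = acc ++ (pvRowL lo y x).reverse := by
  intro y acc
  induction y, acc using gksRowB.induct x lo with
  | case1 y acc h ih =>
      rw [gksRowB, dif_pos h, ih]
      unfold pvRowL
      rw [PySem.List.pyRange_one_succ_right h]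
      simp [List.append_assoc]
  | case2 y acc h =>
      rw [gksRowB, dif_neg h]
      unfold pvRowL
      rw [PySem.List.pyRange_one_eq_nil (by omega)]
      simp

-- descending outer loop = reversed ascending flatMap of rows, appended
theorem pv_gksColsB_eq (M D : Int) : ∀ (x : Int) (acc : List (Int × Int)),
    gksColsB M D x acc
      = acc ++ ((PySem.List.pyRange 1 (x + 1) 1).flatMap
          (fun x' => pvRowL (max 1 (-(PySem.Int.floordiv (-M) x')))
                            (PySem.Int.floordiv D x') x')).reverse := by
  intro x acc
  induction x, acc using gksColsB.induct M D with
  | case1 x acc h ih =>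
      rw [gksColsB, dif_pos h, ih, pv_gksRowB_eq]
      rw [PySem.List.pyRange_one_succ_right h]
      simp [List.append_assoc]
  | case2 x acc h =>
      rw [gksColsB, dif_neg h]
      rw [PySem.List.pyRange_one_eq_nil (by omega)]
      simp

-- ===== VERDICT =====
theorem get_kernel_sizes_spec : Claim_equal_get_kernel_sizes := by
  intro m d _
  show get_kernel_sizes m d = get_kernel_sizes_alt m d
  unfold get_kernel_sizes get_kernel_sizes_alt
  simp only []
  rw [pv_gksColsB_eq]
  rw [List.nil_append, List.reverse_reverse]
  have hA : ∀ acc x, (PySem.List.pyRange 1 (d + 1) 1).foldl (fun acc y =>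
      if x * y ≥ m + m ∧ x * y ≤ d then acc ++ [(x, y)] else acc) acc
      = acc ++ ((PySem.List.pyRange 1 (d + 1) 1).filter
          (fun y => decide (x * y ≥ m + m ∧ x * y ≤ d))).map (fun y => (x, y)) := by
    intro acc x
    exact pv_foldl_append_ite _ (fun y => x * y ≥ m + m ∧ x * y ≤ d) _ acc
  calc (PySem.List.pyRange 1 (d + 1) 1).foldl (fun acc x =>
          (PySem.List.pyRange 1 (d + 1) 1).foldl (fun acc y =>
            if x * y ≥ m + m ∧ x * y ≤ d then acc ++ [(x, y)] else acc) acc) []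
      = (PySem.List.pyRange 1 (d + 1) 1).foldl (fun acc x =>
          acc ++ pvRowL (max 1 (-(PySem.Int.floordiv (-(2 * m)) x)))
                        (PySem.Int.floordiv d x) x) [] := by
        apply PySem.List.foldl_congr_mem
        intro acc x hx
        rw [PySem.List.mem_pyRange_one] at hx
        rw [hA, pv_filter_range (m + m) d x (by omega) (by omega)]
        unfold pvRowL
        norm_num [two_mul]
    _ = _ := by
        rw [pv_foldl_append_flatMap, List.nil_append]
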